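-- pv_equiv track=rewrite | github.com/AamishB/GSTSaathi | backend/app/utils/gstin_validator.py | luhn_mod36_checksum
-- ===== SOURCE A (Python) =====
-- def luhn_mod36_checksum(gstin: str) -> bool:
--     """
--     Verify GSTIN checksum using Luhn mod 36 algorithm.
--
--     The checksum is calculated on the first 14 characters,
--     and the result should match the 15th character.
--
--     Args:
--         gstin: 15-character GSTIN string
--
--     Returns:
--         True if checksum is valid, False otherwise
--     """
--     if len(gstin) != 15:
--         return False
--
--     gstin = gstin.upper().strip()
--
--     # Mapping for mod 36: 0-9, A-Z
--     char_to_value = {}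
--     for i in range(10):
--         char_to_value[str(i)] = i
--     for i, c in enumerate('ABCDEFGHIJKLMNOPQRSTUVWXYZ'):
--         char_to_value[c] = 10 + i
--
--     value_to_char = {v: k for k, v in char_to_value.items()}
--
--     # Calculate checksum
--     total = 0
--     for i, char in enumerate(gstin[:14]):
--         if char not in char_to_value:
--             return False
--         value = char_to_value[char]
--         # Multiply by 2 if position is even (0-indexed)
--         if i % 2 == 0:
--             value *= 2
--             # If result > 35, add digits (same as subtracting 35 for mod 36)
--             if value > 35:
--                 value = (value % 36) + 1
--         total = (total + value) % 36
--
--     # Calculate check digit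
--     check_digit_value = (36 - total) % 36
--     expected_check_digit = value_to_char[check_digit_value]
--
--     return gstin[14] == expected_check_digit
-- ===== SOURCE B (Python) =====
-- _ALPHABET = '0123456789ABCDEFGHIJKLMNOPQRSTUVWXYZ'
--
--
-- def _pair_total(vals):
--     """Checksum total, consuming the values two at a time: the first of each
--     pair is doubled and reduced by summing its base-36 digits, the second is
--     taken as is."""
--     if not vals:
--         return 0
--     d = 2 * vals[0]
--     head = d // 36 + d % 36
--     if len(vals) == 1:
--         return head
--     return head + vals[1] + _pair_total(vals[2:])
--
--
-- def luhn_mod36_checksum(gstin: str) -> bool: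
--     if len(gstin) != 15:
--         return False
--     s = gstin.upper().strip()
--     vals = [_ALPHABET.find(c) for c in s[:14]]
--     if -1 in vals:
--         return False
--     total = _pair_total(vals)
--     return s[14] == _ALPHABET[(36 - total) % 36]
-- ===== Notes on version B (the rewrite author's own statement) =====
-- stated objective: alternative
-- what changed: B drops A's two dict tables and the indexed 14-step loop with its parity branch and per-step mod: it looks characters up by str.find in the alphabet string, computes the total by a recursion that consumes the values two at a time (doubling via the base-36 digit-sum d//36 + d%36, no index, no parity test, no running mod), and reads the expected check character by indexing the alphabet string.
import Mathlib
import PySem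

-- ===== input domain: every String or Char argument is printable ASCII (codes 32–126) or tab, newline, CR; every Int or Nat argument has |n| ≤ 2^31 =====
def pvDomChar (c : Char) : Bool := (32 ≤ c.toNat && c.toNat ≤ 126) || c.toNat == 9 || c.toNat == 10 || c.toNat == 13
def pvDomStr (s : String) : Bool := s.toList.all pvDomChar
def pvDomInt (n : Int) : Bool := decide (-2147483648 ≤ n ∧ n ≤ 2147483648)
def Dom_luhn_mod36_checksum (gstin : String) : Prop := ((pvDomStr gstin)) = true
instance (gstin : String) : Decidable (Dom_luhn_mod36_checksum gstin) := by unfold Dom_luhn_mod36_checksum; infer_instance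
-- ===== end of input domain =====

-- B replaces A's two dict tables and indexed parity loop by an alphabet-string find,
-- a recursion consuming the values two at a time with the base-36 digit-sum, and an
-- alphabet lookup of the check character (objective: alternative decomposition).

-- ===== PORT A =====
-- char_to_value: the Python dict keys are the one-character strings str(i) and the letters;
-- ported with Char keys (exact: every key is a single character and Python feeds it the
-- single characters of the string).
def pvCharToValue : PySem.Dict Char Int :=
  let d := (PySem.List.pyRange 0 10 1).foldl
      (fun d i => d.insert (Char.ofNat (48 + i.toNat)) i) PySem.Dict.empty
  (PySem.List.enumerate "ABCDEFGHIJKLMNOPQRSTUVWXYZ".toList).foldl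
      (fun d p => d.insert p.2 (10 + p.1)) d

def pvValueToChar : PySem.Dict Int Char :=
  pvCharToValue.items.foldl (fun d p => d.insert p.2 p.1) PySem.Dict.empty

-- the 'for i, char in enumerate(gstin[:14])' loop; none = the early 'return False'
-- (the dict is a parameter only so that Lean generates usable equation lemmas)
def pvLoopA (d : PySem.Dict Char Int) : List (Int × Char) → Int → Option Int
  | [], t => some t
  | (i, c) :: rest, t =>
    match d.get? c with
    | none => none
    | some v =>
      let v' := if PySem.Int.mod i 2 == 0 then
                  (if v * 2 > 35 then PySem.Int.mod (v * 2) 36 + 1 else v * 2)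
                else v
      pvLoopA d rest (PySem.Int.mod (t + v') 36)

-- body after 'gstin = gstin.upper().strip()' (the 14-char loop, check digit, comparison)
def pvChecksumBody (g : List Char) : Bool :=
  match pvLoopA pvCharToValue (PySem.List.enumerate (PySem.List.slice g none (some 14))) 0 with
  | none => false
  | some total =>
    -- check_digit_value = (36 - total) % 36; expected = value_to_char[check_digit_value]
    match pvValueToChar.get? (PySem.Int.mod (36 - total) 36) with
    | none => false  -- KeyError: unreachable (the keys cover 0..35)
    | some expected =>
      match PySem.List.pyGet? g 14 with
      | none => false  -- IndexError: exactly the inputs excluded by Pre_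
      | some c => c == expected

def luhn_mod36_checksum (gstin : String) : Bool :=
  if PySem.Str.len gstin ≠ 15 then false
  else pvChecksumBody (PySem.Str.strip (PySem.Str.upper gstin)).toList

-- ===== PORT B =====
def pvAlphabet : List Char := "0123456789ABCDEFGHIJKLMNOPQRSTUVWXYZ".toList

-- _pair_total: recursion consuming the values two at a time
def pvPairTotal : List Int → Int
  | [] => 0
  | [v] => PySem.Int.floordiv (2 * v) 36 + PySem.Int.mod (2 * v) 36
  | v :: w :: rest =>
    PySem.Int.floordiv (2 * v) 36 + PySem.Int.mod (2 * v) 36 + w + pvPairTotal rest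

-- body after 's = gstin.upper().strip()'
def pvAltBody (s : List Char) : Bool :=
  let vals := (PySem.List.slice s none (some 14)).map
      (fun c => PySem.Chars.find pvAlphabet [c])
  if vals.contains (-1) then false
  else
    let total := pvPairTotal vals
    match PySem.List.pyGet? s 14 with
    | none => false  -- IndexError: exactly the inputs excluded by Pre_
    | some c =>
      match PySem.List.pyGet? pvAlphabet (PySem.Int.mod (36 - total) 36) with
      | none => false  -- unreachable: the index is in 0..35
      | some e => c == e

def luhn_mod36_checksum_alt (gstin : String) : Bool :=
  if PySem.Str.len gstin ≠ 15 then false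
  else pvAltBody (PySem.Str.strip (PySem.Str.upper gstin)).toList

-- ===== PRECONDITION & SPEC =====
def pvStripped (gstin : String) : List Char :=
  PySem.Chars.strip (PySem.Chars.upper gstin.toList)

def pvValidChar (c : Char) : Bool :=
  (48 ≤ c.toNat && c.toNat ≤ 57) || (65 ≤ c.toNat && c.toNat ≤ 90)

-- A (and B) raise IndexError exactly when a length-15 input strips (after upper) to fewer
-- than 15 characters that are all checksum-alphabet characters; Pre_ excludes those inputs.
def Pre_luhn_mod36_checksum (gstin : String) : Prop :=
  ¬ (gstin.toList.length = 15 ∧ (pvStripped gstin).length < 15 ∧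
      ((pvStripped gstin).take 14).all pvValidChar = true)

instance (gstin : String) : Decidable (Pre_luhn_mod36_checksum gstin) := by
  unfold Pre_luhn_mod36_checksum; infer_instance

def pvWitness_luhn_mod36_checksum : String := "29ABCDE1234F1Z5"

def Spec_luhn_mod36_checksum (gstin : String) (out : Bool) : Prop := out = luhn_mod36_checksum_alt gstin
instance (gstin : String) (out : Bool) : Decidable (Spec_luhn_mod36_checksum gstin out) := by unfold Spec_luhn_mod36_checksum; infer_instance

-- ===== CLAIM (what is proved, stated in full; the proofs are below) =====
def Claim_equal_luhn_mod36_checksum : Prop := ∀ (gstin : String), Dom_luhn_mod36_checksum gstin → Pre_luhn_mod36_checksum gstin → Spec_luhn_mod36_checksum gstin (luhn_mod36_checksum gstin)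

-- ===== LEMMAS AND PROOFS =====

-- value of a character, proof-side characterisation shared by both ports
def pvCharValue (c : Char) : Int :=
  if 48 ≤ (c.toNat : Int) ∧ (c.toNat : Int) ≤ 57 then (c.toNat : Int) - 48
  else if 65 ≤ (c.toNat : Int) ∧ (c.toNat : Int) ≤ 90 then (c.toNat : Int) - 55
  else -1

theorem pvCharValue_cases (c : Char) :
    pvCharValue c = -1 ∨ (0 ≤ pvCharValue c ∧ pvCharValue c ≤ 35) := by
  unfold pvCharValue; split_ifs <;> omega

set_option maxRecDepth 10000 in
theorem pvCharToValue_lit : pvCharToValue = PySem.Dict.mk [('0', 0), ('1', 1), ('2', 2), ('3', 3), ('4', 4), ('5', 5), ('6', 6), ('7', 7), ('8', 8), ('9', 9), ('A', 10), ('B', 11), ('C', 12), ('D', 13), ('E', 14), ('F', 15), ('G', 16), ('H', 17), ('I', 18), ('J', 19), ('K', 20), ('L', 21), ('M', 22), ('N', 23), ('O', 24), ('P', 25), ('Q', 26), ('R', 27), ('S', 28), ('T', 29), ('U', 30), ('V', 31), ('W', 32), ('X', 33), ('Y', 34), ('Z', 35)] := by rfl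

theorem pv_get?_none (ps : List (Char × Int)) (c : Char)
    (h : ∀ p ∈ ps, pvValidChar p.1 = true) (hc : ¬ pvValidChar c = true) :
    (PySem.Dict.mk ps).get? c = none := by
  induction ps with
  | nil => rfl
  | cons p r ih =>
    rw [PySem.Dict.get?_mk_cons, if_neg, ih (fun q hq => h q (List.mem_cons_of_mem _ hq))]
    intro hb
    exact hc (eq_of_beq hb ▸ h p List.mem_cons_self)

set_option maxRecDepth 10000 in
theorem get?_pvCharToValue (c : Char) :
    pvCharToValue.get? c = if 0 ≤ pvCharValue c then some (pvCharValue c) else none := by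
  by_cases h : 0 ≤ pvCharValue c
  · rw [if_pos h]
    have hn : (48 ≤ c.toNat ∧ c.toNat ≤ 57) ∨ (65 ≤ c.toNat ∧ c.toNat ≤ 90) := by
      unfold pvCharValue at h; split_ifs at h <;> omega
    have hco := (Char.ofNat_toNat c).symm
    have h1 : 48 ≤ c.toNat := by omega
    have h2 : c.toNat ≤ 90 := by omega
    interval_cases hc : c.toNat <;> first
      | (exfalso; omega)
      | (rw [hco]; decide)
  · rw [if_neg h]
    have hn : ¬ ((48 ≤ c.toNat ∧ c.toNat ≤ 57) ∨ (65 ≤ c.toNat ∧ c.toNat ≤ 90)) := by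
      unfold pvCharValue at h; split_ifs at h <;> omega
    rw [pvCharToValue_lit]
    apply pv_get?_none
    · decide
    · intro hx
      simp only [pvValidChar, Bool.or_eq_true, Bool.and_eq_true, decide_eq_true_eq] at hx
      omega

set_option maxRecDepth 10000 in
theorem find_pvAlphabet (c : Char) :
    PySem.Chars.find pvAlphabet [c] = pvCharValue c := by
  by_cases h : (48 ≤ c.toNat ∧ c.toNat ≤ 57) ∨ (65 ≤ c.toNat ∧ c.toNat ≤ 90)
  · have hco := (Char.ofNat_toNat c).symm
    have h1 : 48 ≤ c.toNat := by omega
    have h2 : c.toNat ≤ 90 := by omega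
    interval_cases hc : c.toNat <;> first
      | (exfalso; omega)
      | (rw [hco]; decide)
  · have hv : pvCharValue c = -1 := by unfold pvCharValue; split_ifs <;> omega
    have hni : ¬ ([c] <:+: pvAlphabet) := by
      intro hinf
      have hm : c ∈ pvAlphabet := List.singleton_sublist.mp hinf.sublist
      have hall : pvAlphabet.all pvValidChar = true := by decide
      have hvc := List.all_eq_true.mp hall c hm
      simp only [pvValidChar, Bool.or_eq_true, Bool.and_eq_true, decide_eq_true_eq] at hvc
      exact h hvc
    rw [hv, (PySem.Chars.find_eq_neg_one_iff _ _).mpr hni]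

set_option maxRecDepth 10000 in
theorem get?_pvValueToChar (k : Int) (h0 : 0 ≤ k) (h1 : k < 36) :
    pvValueToChar.get? k = PySem.List.pyGet? pvAlphabet k := by
  interval_cases k <;> decide

-- the weight A gives position i
def pvW (i v : Int) : Int :=
  if PySem.Int.mod i 2 == 0 then
    (if v * 2 > 35 then PySem.Int.mod (v * 2) 36 + 1 else v * 2)
  else v

def pvWsum : List Char → Int → Int
  | [], _ => 0
  | c :: r, i => pvW i (pvCharValue c) + pvWsum r (i + 1)

theorem pvLoopA_spec (cs : List Char) (i t : Int) (h0 : 0 ≤ t) (h36 : t < 36) :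
    pvLoopA pvCharToValue (PySem.List.enumerate cs i) t =
      if cs.all (fun c => decide (0 ≤ pvCharValue c)) then
        some (PySem.Int.mod (t + pvWsum cs i) 36)
      else none := by
  induction cs generalizing i t with
  | nil =>
    simp only [PySem.List.enumerate_nil, pvLoopA, List.all_nil, if_true]
    congr 1
    simp only [pvWsum, add_zero, PySem.Int.mod_eq_emod_of_pos (by norm_num : (0:Int) < 36)]
    omega
  | cons c r ih =>
    rw [PySem.List.enumerate_cons]
    have hg := get?_pvCharToValue c
    by_cases hc : 0 ≤ pvCharValue c
    · rw [if_pos hc] at hg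
      simp only [pvLoopA, hg]
      rw [show (if (PySem.Int.mod i 2 == 0) = true then
            (if pvCharValue c * 2 > 35 then PySem.Int.mod (pvCharValue c * 2) 36 + 1
             else pvCharValue c * 2)
          else pvCharValue c) = pvW i (pvCharValue c) from rfl,
        ih (i + 1) _ (PySem.Int.mod_nonneg _ (by norm_num)) (PySem.Int.mod_lt _ (by norm_num))]
      simp only [List.all_cons, hc, decide_true, Bool.true_and]
      by_cases hall : r.all (fun c => decide (0 ≤ pvCharValue c)) = true
      · rw [if_pos hall, if_pos hall]
        have : PySem.Int.mod (PySem.Int.mod (t + pvW i (pvCharValue c)) 36 + pvWsum r (i + 1)) 36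
            = PySem.Int.mod (t + pvWsum (c :: r) i) 36 := by
          simp only [pvWsum, PySem.Int.mod_eq_emod_of_pos (by norm_num : (0:Int) < 36)]
          omega
        rw [this]
      · rw [if_neg hall, if_neg hall]
    · rw [if_neg hc] at hg
      simp only [pvLoopA, hg]
      have : (c :: r).all (fun c => decide (0 ≤ pvCharValue c)) = false := by
        simp [List.all_cons, hc]
      rw [this]
      simp

-- B's pairwise recursion computes exactly A's weighted sum (for an even start index)
theorem pairTotal_eq : ∀ (cs : List Char) (i : Int), PySem.Int.mod i 2 = 0 →
    (∀ c ∈ cs, 0 ≤ pvCharValue c) →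
    pvPairTotal (cs.map pvCharValue) = pvWsum cs i
  | [], _, _, _ => by simp [pvPairTotal, pvWsum]
  | [c], i, hi, hv => by
    have h0 : 0 ≤ pvCharValue c := hv c List.mem_cons_self
    have h35 : pvCharValue c ≤ 35 := by rcases pvCharValue_cases c with h | h <;> omega
    simp only [List.map_cons, List.map_nil, pvPairTotal, pvWsum, pvW, hi, beq_self_eq_true,
      if_true, add_zero]
    rw [PySem.Int.floordiv_eq_ediv_of_pos (by norm_num),
      PySem.Int.mod_eq_emod_of_pos (by norm_num),
      PySem.Int.mod_eq_emod_of_pos (by norm_num)]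
    split_ifs <;> omega
  | a :: b :: r, i, hi, hv => by
    have ha : 0 ≤ pvCharValue a := hv a List.mem_cons_self
    have ha35 : pvCharValue a ≤ 35 := by rcases pvCharValue_cases a with h | h <;> omega
    have hmod := PySem.Int.mod_eq_emod_of_pos (a := i) (by norm_num : (0:Int) < 2)
    have hodd : PySem.Int.mod (i + 1) 2 = 1 := by
      rw [PySem.Int.mod_eq_emod_of_pos (by norm_num)]
      rw [hmod] at hi
      omega
    have hi2 : PySem.Int.mod (i + 2) 2 = 0 := by
      rw [PySem.Int.mod_eq_emod_of_pos (by norm_num)]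
      rw [hmod] at hi
      omega
    have ih := pairTotal_eq r (i + 2) hi2
      (fun c hc => hv c (List.mem_cons_of_mem _ (List.mem_cons_of_mem _ hc)))
    simp only [List.map_cons, pvPairTotal, pvWsum, ih, pvW, hi, hodd, beq_self_eq_true, if_true]
    rw [show ((1:Int) == 0) = false from rfl]
    simp only [Bool.false_eq_true, if_false]
    rw [show i + 1 + 1 = i + 2 from by ring,
      show (2:Int) * pvCharValue a = pvCharValue a * 2 from mul_comm _ _,
      PySem.Int.floordiv_eq_ediv_of_pos (by norm_num),
      PySem.Int.mod_eq_emod_of_pos (by norm_num)]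
    split_ifs <;> omega

theorem pv_core (l : List Char) : pvChecksumBody l = pvAltBody l := by
  unfold pvChecksumBody pvAltBody
  simp only [find_pvAlphabet]
  rw [pvLoopA_spec _ 0 0 le_rfl (by norm_num)]
  by_cases hall : (PySem.List.slice l none (some 14)).all
      (fun c => decide (0 ≤ pvCharValue c)) = true
  · rw [if_pos hall]
    have hcont : ((PySem.List.slice l none (some 14)).map pvCharValue).contains (-1) = false := by
      rw [Bool.eq_false_iff]
      intro hx
      rw [List.contains_iff_mem, List.mem_map] at hx
      obtain ⟨c, hc, hcv⟩ := hx
      have := of_decide_eq_true (List.all_eq_true.mp hall c hc)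
      omega
    have hpt : pvPairTotal ((PySem.List.slice l none (some 14)).map pvCharValue)
        = pvWsum (PySem.List.slice l none (some 14)) 0 :=
      pairTotal_eq _ 0 (by decide)
        (fun c hc => of_decide_eq_true (List.all_eq_true.mp hall c hc))
    simp only [hcont, Bool.false_eq_true, if_false, hpt]
    set T := pvWsum (PySem.List.slice l none (some 14)) 0 with hT
    have hkey : PySem.Int.mod (36 - PySem.Int.mod (0 + T) 36) 36
        = PySem.Int.mod (36 - T) 36 := by
      simp only [PySem.Int.mod_eq_emod_of_pos (by norm_num : (0:Int) < 36)]
      omega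
    rw [hkey]
    have h0 : 0 ≤ PySem.Int.mod (36 - T) 36 := PySem.Int.mod_nonneg _ (by norm_num)
    have h36 : PySem.Int.mod (36 - T) 36 < 36 := PySem.Int.mod_lt _ (by norm_num)
    rw [get?_pvValueToChar _ h0 h36]
    obtain ⟨e, he⟩ : ∃ e, PySem.List.pyGet? pvAlphabet (PySem.Int.mod (36 - T) 36) = some e := by
      rw [show PySem.Int.mod (36 - T) 36 = (((PySem.Int.mod (36 - T) 36).toNat : Nat) : Int)
          from (Int.toNat_of_nonneg h0).symm, PySem.List.pyGet?_natCast]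
      have hlen : pvAlphabet.length = 36 := rfl
      exact ⟨_, List.getElem?_eq_getElem (by omega)⟩
    rw [he]
  · rw [if_neg hall]
    have hcont : ((PySem.List.slice l none (some 14)).map pvCharValue).contains (-1) = true := by
      obtain ⟨c, hc, hcv⟩ : ∃ c ∈ PySem.List.slice l none (some 14),
          ¬ (0 ≤ pvCharValue c) := by
        by_contra hx
        push Not at hx
        exact hall (List.all_eq_true.mpr fun x hxm => decide_eq_true (hx x hxm))
      rw [List.contains_iff_mem, List.mem_map]
      exact ⟨c, hc, by rcases pvCharValue_cases c with h | h <;> omega⟩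
    simp only [hcont, if_true]

theorem pv_main (g : String) :
    luhn_mod36_checksum g = luhn_mod36_checksum_alt g := by
  unfold luhn_mod36_checksum luhn_mod36_checksum_alt
  by_cases hL : PySem.Str.len g = 15
  · rw [if_neg (fun h => h hL), if_neg (fun h => h hL)]
    exact pv_core _
  · rw [if_pos hL, if_pos hL]

-- ===== VERDICT (by name: the statement is the Claim_ definition above) =====
theorem luhn_mod36_checksum_spec : Claim_equal_luhn_mod36_checksum := by
  intro g _ _
  unfold Spec_luhn_mod36_checksum
  exact (pv_main g).symm ▸ rfl
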